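-- pv_equiv track=rewrite | github.com/chrysts/dsn_fewshot | Conv4/utils.py | set_protocol
-- ===== SOURCE A (Python) =====
-- def set_protocol(data_path, protocol, test_protocol, subset=None):
--     train = []
--     val = []
--
--     all_set = ['shn', 'hon', 'clv', 'clk', 'gls', 'scl', 'sci', 'nat', 'shx', 'rel']
--
--     if subset is not None:
--         train.append(data_path + '/crops_' + subset + '/')
--         val.append(data_path + '/crops_' + subset + '/')
--
--     if protocol == 'p1':
--         for i in range(3):
--             train.append(data_path + '/crops_' + all_set[i])
--     elif protocol == 'p2':
--         for i in range(3, 6):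
--             train.append(data_path + '/crops_' + all_set[i])
--     elif protocol == 'p3':
--         for i in range(6, 8):
--             train.append(data_path + '/crops_' + all_set[i])
--     elif protocol == 'p4':
--         for i in range(8, 10):
--             train.append(data_path + '/crops_' + all_set[i])
--
--     if test_protocol == 'p1':
--         for i in range(3):
--             val.append(data_path + '/crops_' + all_set[i])
--     elif test_protocol == 'p2':
--         for i in range(3, 6):
--             val.append(data_path + '/crops_' + all_set[i])
--     elif test_protocol == 'p3':
--         for i in range(6, 8):
--             val.append(data_path + '/crops_' + all_set[i])
--     elif test_protocol == 'p4':
--         for i in range(8, 10):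
--             val.append(data_path + '/crops_' + all_set[i])
--
--
--     return train, val
-- ===== SOURCE B (Python) =====
-- def set_protocol(data_path, protocol, test_protocol, subset=None):
--     # One fused pass over the whole dataset catalogue: each name carries the
--     # protocol group it belongs to, and a single loop classifies every name
--     # into train and/or val by comparing its group tag.
--     catalogue = [('p1', 'shn'), ('p1', 'hon'), ('p1', 'clv'),
--                  ('p2', 'clk'), ('p2', 'gls'), ('p2', 'scl'),
--                  ('p3', 'sci'), ('p3', 'nat'),
--                  ('p4', 'shx'), ('p4', 'rel')]
--     prefix = [] if subset is None else [data_path + '/crops_' + subset + '/']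
--     train = list(prefix)
--     val = list(prefix)
--     for group, name in catalogue:
--         path = data_path + '/crops_' + name
--         if group == protocol:
--             train.append(path)
--         if group == test_protocol:
--             val.append(path)
--     return train, val
-- ===== Notes on version B (the rewrite author's own statement) =====
-- stated objective: alternative
-- what changed: Instead of A's two duplicated four-branch if/elif blocks each looping over an index range, B tags every dataset name with its protocol group in one catalogue and makes a single fused pass that classifies each name into train and/or val by comparing its tag.
import Mathlib
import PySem

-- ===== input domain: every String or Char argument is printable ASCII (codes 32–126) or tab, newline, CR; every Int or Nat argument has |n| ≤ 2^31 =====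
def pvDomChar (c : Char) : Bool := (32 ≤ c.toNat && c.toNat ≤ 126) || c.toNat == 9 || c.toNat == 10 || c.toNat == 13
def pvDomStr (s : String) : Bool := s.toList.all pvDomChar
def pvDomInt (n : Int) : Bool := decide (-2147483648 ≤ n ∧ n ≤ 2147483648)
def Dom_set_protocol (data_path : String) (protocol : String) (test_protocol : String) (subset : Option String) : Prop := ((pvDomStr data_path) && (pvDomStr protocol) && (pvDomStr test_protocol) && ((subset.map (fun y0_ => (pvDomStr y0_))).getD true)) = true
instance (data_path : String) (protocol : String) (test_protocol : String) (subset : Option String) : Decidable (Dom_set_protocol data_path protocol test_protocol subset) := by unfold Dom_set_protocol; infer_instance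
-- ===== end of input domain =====

set_option maxRecDepth 4000


-- B replaces A's two duplicated four-branch range loops by a single fused pass
-- over a protocol-tagged catalogue that classifies each name into train and/or
-- val; objective: alternative (same cost, one loop instead of eight branches).

-- ===== PORT A =====
def pvAllSet : List String := ["shn", "hon", "clv", "clk", "gls", "scl", "sci", "nat", "shx", "rel"]

def set_protocol (data_path : String) (protocol : String) (test_protocol : String) (subset : Option String) : List String × List String :=
  let train : List String := []
  let val : List String := []
  let train := match subset with
    | some s => train ++ [data_path ++ "/crops_" ++ s ++ "/"]
    | none => train
  let val := match subset with
    | some s => val ++ [data_path ++ "/crops_" ++ s ++ "/"]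
    | none => val
  let train :=
    if protocol == "p1" then
      (PySem.List.pyRange 0 3 1).foldl (fun acc i => acc ++ [data_path ++ "/crops_" ++ PySem.List.pyGetD pvAllSet i ""]) train
    else if protocol == "p2" then
      (PySem.List.pyRange 3 6 1).foldl (fun acc i => acc ++ [data_path ++ "/crops_" ++ PySem.List.pyGetD pvAllSet i ""]) train
    else if protocol == "p3" then
      (PySem.List.pyRange 6 8 1).foldl (fun acc i => acc ++ [data_path ++ "/crops_" ++ PySem.List.pyGetD pvAllSet i ""]) train
    else if protocol == "p4" then
      (PySem.List.pyRange 8 10 1).foldl (fun acc i => acc ++ [data_path ++ "/crops_" ++ PySem.List.pyGetD pvAllSet i ""]) train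
    else train
  let val :=
    if test_protocol == "p1" then
      (PySem.List.pyRange 0 3 1).foldl (fun acc i => acc ++ [data_path ++ "/crops_" ++ PySem.List.pyGetD pvAllSet i ""]) val
    else if test_protocol == "p2" then
      (PySem.List.pyRange 3 6 1).foldl (fun acc i => acc ++ [data_path ++ "/crops_" ++ PySem.List.pyGetD pvAllSet i ""]) val
    else if test_protocol == "p3" then
      (PySem.List.pyRange 6 8 1).foldl (fun acc i => acc ++ [data_path ++ "/crops_" ++ PySem.List.pyGetD pvAllSet i ""]) val
    else if test_protocol == "p4" then
      (PySem.List.pyRange 8 10 1).foldl (fun acc i => acc ++ [data_path ++ "/crops_" ++ PySem.List.pyGetD pvAllSet i ""]) val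
    else val
  (train, val)

-- ===== PORT B =====
def pvCatalogue : List (String × String) :=
  [("p1", "shn"), ("p1", "hon"), ("p1", "clv"),
   ("p2", "clk"), ("p2", "gls"), ("p2", "scl"),
   ("p3", "sci"), ("p3", "nat"),
   ("p4", "shx"), ("p4", "rel")]

def set_protocol_alt (data_path : String) (protocol : String) (test_protocol : String) (subset : Option String) : List String × List String :=
  let pre : List String := match subset with
    | none => []
    | some s => [data_path ++ "/crops_" ++ s ++ "/"]
  pvCatalogue.foldl (fun (acc : List String × List String) gn =>
      let path := data_path ++ "/crops_" ++ gn.2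
      let train := if gn.1 == protocol then acc.1 ++ [path] else acc.1
      let val := if gn.1 == test_protocol then acc.2 ++ [path] else acc.2
      (train, val))
    (pre, pre)

-- ===== PRECONDITION & SPEC =====
def Spec_set_protocol (data_path : String) (protocol : String) (test_protocol : String) (subset : Option String) (out : List String × List String) : Prop := out = set_protocol_alt data_path protocol test_protocol subset
instance (data_path : String) (protocol : String) (test_protocol : String) (subset : Option String) (out : List String × List String) : Decidable (Spec_set_protocol data_path protocol test_protocol subset out) := by unfold Spec_set_protocol; infer_instance

-- ===== CLAIM (what is proved, stated in full; the proofs are below) =====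
def Claim_equal_set_protocol : Prop := ∀ (data_path : String) (protocol : String) (test_protocol : String) (subset : Option String), Dom_set_protocol data_path protocol test_protocol subset → Spec_set_protocol data_path protocol test_protocol subset (set_protocol data_path protocol test_protocol subset)

-- ===== LEMMAS AND PROOFS =====
-- B's fused fold over the catalogue computes componentwise: the train side and
-- the val side are independent folds.
theorem pv_fold_split (dp p tp : String) (xs : List (String × String)) (t v : List String) :
    xs.foldl (fun (acc : List String × List String) gn =>
        let path := dp ++ "/crops_" ++ gn.2
        ((if gn.1 == p then acc.1 ++ [path] else acc.1),
         (if gn.1 == tp then acc.2 ++ [path] else acc.2))) (t, v)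
    = (xs.foldl (fun acc gn => if gn.1 == p then acc ++ [dp ++ "/crops_" ++ gn.2] else acc) t,
       xs.foldl (fun acc gn => if gn.1 == tp then acc ++ [dp ++ "/crops_" ++ gn.2] else acc) v) := by
  induction xs generalizing t v with
  | nil => rfl
  | cons hd tl ih => simp only [List.foldl]; exact ih _ _

-- One if/elif block of A equals B's one-sided catalogue fold, for any base list.
theorem pv_block_eq (dp proto : String) (base : List String) :
    (if proto == "p1" then
      (PySem.List.pyRange 0 3 1).foldl (fun acc i => acc ++ [dp ++ "/crops_" ++ PySem.List.pyGetD pvAllSet i ""]) base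
    else if proto == "p2" then
      (PySem.List.pyRange 3 6 1).foldl (fun acc i => acc ++ [dp ++ "/crops_" ++ PySem.List.pyGetD pvAllSet i ""]) base
    else if proto == "p3" then
      (PySem.List.pyRange 6 8 1).foldl (fun acc i => acc ++ [dp ++ "/crops_" ++ PySem.List.pyGetD pvAllSet i ""]) base
    else if proto == "p4" then
      (PySem.List.pyRange 8 10 1).foldl (fun acc i => acc ++ [dp ++ "/crops_" ++ PySem.List.pyGetD pvAllSet i ""]) base
    else base)
    = pvCatalogue.foldl (fun acc gn => if gn.1 == proto then acc ++ [dp ++ "/crops_" ++ gn.2] else acc) base := by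
  by_cases h1 : proto = "p1"
  · subst h1
    simp [pvCatalogue, List.foldl,
        show PySem.List.pyRange 0 3 1 = [0, 1, 2] from by decide,
        show PySem.List.pyGetD pvAllSet 0 "" = "shn" from by decide,
        show PySem.List.pyGetD pvAllSet 1 "" = "hon" from by decide,
        show PySem.List.pyGetD pvAllSet 2 "" = "clv" from by decide]
  · by_cases h2 : proto = "p2"
    · subst h2
      simp [pvCatalogue, List.foldl,
        show PySem.List.pyRange 3 6 1 = [3, 4, 5] from by decide,
        show PySem.List.pyGetD pvAllSet 3 "" = "clk" from by decide,
        show PySem.List.pyGetD pvAllSet 4 "" = "gls" from by decide,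
        show PySem.List.pyGetD pvAllSet 5 "" = "scl" from by decide]
    · by_cases h3 : proto = "p3"
      · subst h3
        simp [pvCatalogue, List.foldl,
        show PySem.List.pyRange 6 8 1 = [6, 7] from by decide,
        show PySem.List.pyGetD pvAllSet 6 "" = "sci" from by decide,
        show PySem.List.pyGetD pvAllSet 7 "" = "nat" from by decide]
      · by_cases h4 : proto = "p4"
        · subst h4
          simp [pvCatalogue, List.foldl,
        show PySem.List.pyRange 8 10 1 = [8, 9] from by decide,
        show PySem.List.pyGetD pvAllSet 8 "" = "shx" from by decide,
        show PySem.List.pyGetD pvAllSet 9 "" = "rel" from by decide]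
        · simp [pvCatalogue, List.foldl, h1, h2, h3, h4,
            Ne.symm h1, Ne.symm h2, Ne.symm h3, Ne.symm h4]

theorem set_protocol_spec_aux (dp p tp : String) (subset : Option String) :
    set_protocol dp p tp subset = set_protocol_alt dp p tp subset := by
  unfold set_protocol set_protocol_alt
  cases subset <;>
    simp only [List.nil_append, pv_fold_split, pv_block_eq]

-- ===== VERDICT (by name: the statement is the Claim_ definition above) =====
theorem set_protocol_spec : Claim_equal_set_protocol := by
  intro dp p tp sub _
  exact set_protocol_spec_aux dp p tp sub
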